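-- pv_equiv track=rewrite | github.com/Daveej-Dev/cuddly-octo-doodle | Single File Programs/Python/in_base_addition.py | in_base_addition
-- ===== SOURCE A (Python) =====
-- def in_base_addition(number1: str, number2: str, base: str):
--     baseSize = len(base)
--     digitSize = len(base[0])
--     num1List = []
--     num2List = []
--     sumList = []
--     partition = 0
--     resultString = ''
--     while partition < len(number1):
--         num1List.append(number1[partition:(partition+digitSize)])
--         partition = partition + digitSize
--     partition = 0
--     while partition < len(number2):
--         num2List.append(number2[partition:(partition+digitSize)])
--         partition = partition + digitSize
--     for i in range(0, len(num1List)):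
--         num1List[i] = base.index(num1List[i])
--     for i in range(0, len(num2List)):
--         num2List[i] = base.index(num2List[i])
--     num1List.reverse()
--     num2List.reverse()
--     if len(num1List) < len(num2List):
--         for i in range(0, len(num1List)):
--             sumList.append(num1List[i] + num2List[i])
--         for i in range(len(num1List), len(num2List)):
--             sumList.append(num2List[i])
--     else:
--         for i in range(0, len(num2List)):
--             sumList.append(num1List[i] + num2List[i])
--         for i in range(len(num2List), len(num1List)):
--             sumList.append(num1List[i])
--     for i in range(0, len(sumList)-1):
--         if sumList[i] >= baseSize:
--             sumList[i+1] = sumList[i+1] + 1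
--             sumList[i] = sumList[i] % baseSize
--     if sumList[len(sumList)-1] >= baseSize:
--         sumList[len(sumList)-1] = sumList[len(sumList)-1] % baseSize
--         sumList.append(1)
--     sumList.reverse()
--     for i in range(0, len(sumList)):
--         resultString = resultString + base[sumList[i]]
--     return resultString
-- ===== SOURCE B (Python) =====
-- def in_base_addition(number1: str, number2: str, base: str):
--     def to_int(s):
--         v = 0
--         for ch in s:
--             v = v * len(base) + base.index(ch)
--         return v
--     total = to_int(number1) + to_int(number2)
--     width = max(len(number1), len(number2))
--     digits = []
--     for _ in range(width):
--         total, d = divmod(total, len(base))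
--         digits.append(base[d])
--     if total:
--         digits.append(base[total])
--     return ''.join(reversed(digits))
-- ===== Notes on version B (the rewrite author's own statement) =====
-- stated objective: simpler
-- what changed: B converts both strings to a single integer with a Horner fold, adds, and re-encodes by repeated divmod padded to the wider input's width, instead of A's chunk/index/reverse/pairwise-add/in-place-carry pipeline.
-- crash fix: When both number strings are empty A raises IndexError on sumList[-1]; B returns the empty string. — e.g. on in_base_addition("", "", "01"): A raises IndexError, B returns ""
import Mathlib
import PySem

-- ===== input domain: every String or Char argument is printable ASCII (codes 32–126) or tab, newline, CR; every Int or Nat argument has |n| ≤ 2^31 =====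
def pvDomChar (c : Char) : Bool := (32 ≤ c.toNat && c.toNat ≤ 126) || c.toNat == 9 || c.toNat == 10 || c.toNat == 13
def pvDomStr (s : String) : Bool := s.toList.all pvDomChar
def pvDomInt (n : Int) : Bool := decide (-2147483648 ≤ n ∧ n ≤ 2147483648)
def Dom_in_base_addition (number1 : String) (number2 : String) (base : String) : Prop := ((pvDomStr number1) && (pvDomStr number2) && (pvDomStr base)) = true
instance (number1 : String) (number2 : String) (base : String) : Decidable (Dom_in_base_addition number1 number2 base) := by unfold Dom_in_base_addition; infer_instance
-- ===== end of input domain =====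

-- B replaces A's chunk/index/reverse/pairwise-add/in-place-carry pipeline with a Horner
-- fold to one integer, an integer addition, and a divmod re-encoding (objective: simpler).

-- ===== PORT A =====
-- while partition < len(s): append s[partition:partition+digitSize]; partition += digitSize
-- (fuel = s.length bounds the iteration count since digitSize ≥ 1 whenever the loop is reached)
def pvChunksA (s : List Char) (d : Nat) : Nat → Nat → List (List Char)
  | 0, _ => []
  | fuel + 1, part =>
    if part < s.length then
      PySem.List.slice s (some (part : Int)) (some ((part : Int) + (d : Int))) ::
        pvChunksA s d fuel (part + d)
    else []

-- for i in range(0, len(sumList)-1): if sumList[i] >= baseSize: sumList[i+1] += 1; sumList[i] %= baseSize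
def pvCarryLoopA (b : Int) : List Int → List Int
  | [] => []
  | [x] => [x]
  | x :: y :: r =>
    if x ≥ b then PySem.Int.mod x b :: pvCarryLoopA b ((y + 1) :: r)
    else x :: pvCarryLoopA b (y :: r)
termination_by s => s.length

-- if sumList[-1] >= baseSize: sumList[-1] %= baseSize; sumList.append(1)
-- (Python raises IndexError on an empty sumList; that input is excluded by Pre_)
def pvFinalA (b : Int) (s : List Int) : List Int :=
  match s.getLast? with
  | none => s
  | some last => if last ≥ b then s.dropLast ++ [PySem.Int.mod last b, 1] else s

def in_base_addition (number1 : String) (number2 : String) (base : String) : String :=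
  let bl := base.toList
  let baseSize : Int := bl.length
  match PySem.Str.pyGet? base 0 with
  | none => ""   -- Python raises IndexError on base[0]; excluded by Pre_
  | some _ =>
    let digitSize : Nat := 1   -- len(base[0]): a one-character string has length 1
    let num1Chunks := pvChunksA number1.toList digitSize number1.toList.length 0
    let num2Chunks := pvChunksA number2.toList digitSize number2.toList.length 0
    -- num1List[i] = base.index(num1List[i])  (ValueError, i.e. find = -1, excluded by Pre_)
    let num1List := num1Chunks.map (fun ch => PySem.Chars.find bl ch)
    let num2List := num2Chunks.map (fun ch => PySem.Chars.find bl ch)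
    let r1 := num1List.reverse
    let r2 := num2List.reverse
    let sumList :=
      if r1.length < r2.length then
        (List.range r1.length).map (fun i => r1.getD i 0 + r2.getD i 0) ++
          (List.range' r1.length (r2.length - r1.length)).map (fun i => r2.getD i 0)
      else
        (List.range r2.length).map (fun i => r1.getD i 0 + r2.getD i 0) ++
          (List.range' r2.length (r1.length - r2.length)).map (fun i => r1.getD i 0)
    let s1 := pvCarryLoopA baseSize sumList
    let s2 := pvFinalA baseSize s1
    -- resultString += base[sumList[i]] over the reversed list (out-of-range excluded by Pre_)
    String.ofList (s2.reverse.foldl (fun acc d => acc ++ [PySem.List.pyGetD bl d ' ']) [])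

-- ===== PORT B =====
-- v = 0; for ch in s: v = v*len(base) + base.index(ch)
def pvToIntB (bl : List Char) (s : List Char) : Int :=
  s.foldl (fun v c => v * (bl.length : Int) + PySem.Chars.find bl [c]) 0

-- for _ in range(width): total, d = divmod(total, len(base)); digits.append(base[d])
-- returns (digits little-endian, final total); divmod? none = ZeroDivisionError, excluded by Pre_
def pvEncodeB (bl : List Char) (b : Int) : Nat → Int → List Char × Int
  | 0, total => ([], total)
  | k + 1, total =>
    match PySem.Int.divmod? total b with
    | none => ([], total)
    | some (q, d) =>
      let rest := pvEncodeB bl b k q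
      (PySem.List.pyGetD bl d ' ' :: rest.1, rest.2)

def in_base_addition_alt (number1 : String) (number2 : String) (base : String) : String :=
  let bl := base.toList
  let total := pvToIntB bl number1.toList + pvToIntB bl number2.toList
  let width := max number1.toList.length number2.toList.length
  let enc := pvEncodeB bl (bl.length : Int) width total
  let digits := if enc.2 ≠ 0 then enc.1 ++ [PySem.List.pyGetD bl enc.2 ' '] else enc.1
  String.ofList digits.reverse

-- ===== PRECONDITION & SPEC =====
-- Pre_ = exactly the inputs where A returns: base nonempty (else IndexError on base[0]),
-- not both numbers empty (else IndexError on sumList[-1]), every digit present in base (else ValueError).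
def Pre_in_base_addition (number1 : String) (number2 : String) (base : String) : Prop :=
  base.toList ≠ [] ∧ (number1.toList ≠ [] ∨ number2.toList ≠ []) ∧
  number1.toList.all (fun c => base.toList.contains c) = true ∧
  number2.toList.all (fun c => base.toList.contains c) = true
instance (number1 : String) (number2 : String) (base : String) : Decidable (Pre_in_base_addition number1 number2 base) := by unfold Pre_in_base_addition; infer_instance

def pvWitness_in_base_addition : String × String × String := ("101", "11", "01")

-- When both number strings are empty A raises IndexError (sumList[-1] on the empty list); B returns "".
def Raises_in_base_addition (number1 : String) (number2 : String) (base : String) : Prop :=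
  number1.toList = [] ∧ number2.toList = []
instance (number1 : String) (number2 : String) (base : String) : Decidable (Raises_in_base_addition number1 number2 base) := by unfold Raises_in_base_addition; infer_instance
def pvRaiseWitness_in_base_addition : String × String × String := ("", "", "01")
def pvRaiseWitnessOut_in_base_addition : String := ""

def Spec_in_base_addition (number1 : String) (number2 : String) (base : String) (out : String) : Prop := out = in_base_addition_alt number1 number2 base
instance (number1 : String) (number2 : String) (base : String) (out : String) : Decidable (Spec_in_base_addition number1 number2 base out) := by unfold Spec_in_base_addition; infer_instance

-- ===== CLAIM (what is proved, stated in full; the proofs are below) =====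
def Claim_equal_in_base_addition : Prop := ∀ (number1 : String) (number2 : String) (base : String), Dom_in_base_addition number1 number2 base → Pre_in_base_addition number1 number2 base → Spec_in_base_addition number1 number2 base (in_base_addition number1 number2 base)
def Claim_raises_in_base_addition : Prop := (∀ (number1 : String) (number2 : String) (base : String), Dom_in_base_addition number1 number2 base → Raises_in_base_addition number1 number2 base → ¬ Pre_in_base_addition number1 number2 base) ∧ (Dom_in_base_addition (pvRaiseWitness_in_base_addition.1) (pvRaiseWitness_in_base_addition.2.1) (pvRaiseWitness_in_base_addition.2.2) ∧ Raises_in_base_addition (pvRaiseWitness_in_base_addition.1) (pvRaiseWitness_in_base_addition.2.1) (pvRaiseWitness_in_base_addition.2.2) ∧ in_base_addition_alt (pvRaiseWitness_in_base_addition.1) (pvRaiseWitness_in_base_addition.2.1) (pvRaiseWitness_in_base_addition.2.2) = pvRaiseWitnessOut_in_base_addition)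


-- ===== LEMMAS AND PROOFS =====

-- proof-side little-endian machinery
def pvAddLE : List Int → List Int → List Int
  | [], ys => ys
  | xs, [] => xs
  | x :: xs, y :: ys => (x + y) :: pvAddLE xs ys

def pvValLE (b : Int) : List Int → Int
  | [] => 0
  | x :: r => x + b * pvValLE b r

def pvEncLE (b : Int) : Nat → Int → List Int
  | 0, _ => []
  | k + 1, t => PySem.Int.mod t b :: pvEncLE b k (PySem.Int.floordiv t b)

def pvQIter (b : Int) : Nat → Int → Int
  | 0, t => t
  | k + 1, t => pvQIter b k (PySem.Int.floordiv t b)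

def pvEncFull (b : Int) (k : Nat) (t : Int) : List Int :=
  pvEncLE b k t ++ (if pvQIter b k t ≠ 0 then [pvQIter b k t] else [])

lemma pvEncFull_zero (b t : Int) : pvEncFull b 0 t = if t ≠ 0 then [t] else [] := by
  simp [pvEncFull, pvEncLE, pvQIter]

lemma pvEncFull_succ (b t : Int) (k : Nat) :
    pvEncFull b (k + 1) t = PySem.Int.mod t b :: pvEncFull b k (PySem.Int.floordiv t b) := by
  simp [pvEncFull, pvEncLE, pvQIter]

lemma pvModFloor (b x q : Int) (hx0 : 0 ≤ x) (hxb : x < b) :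
    PySem.Int.mod (x + b * q) b = x ∧ PySem.Int.floordiv (x + b * q) b = q := by
  have hb : 0 < b := lt_of_le_of_lt hx0 hxb
  rw [PySem.Int.mod_eq_emod_of_pos hb, PySem.Int.floordiv_eq_ediv_of_pos hb]
  constructor
  · rw [Int.add_mul_emod_self_left, Int.emod_eq_of_lt hx0 hxb]
  · rw [Int.add_mul_ediv_left _ _ (ne_of_gt hb), Int.ediv_eq_zero_of_lt hx0 hxb]; ring

-- A's chunk loop with digitSize 1 is the list of singleton chunks
lemma pvChunksA_eq (s : List Char) :
    ∀ fuel part, s.length ≤ fuel + part →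
      pvChunksA s 1 fuel part = (s.drop part).map (fun c => [c]) := by
  intro fuel
  induction fuel with
  | zero =>
    intro part h
    have : s.drop part = [] := List.drop_eq_nil_of_le (by omega)
    simp [pvChunksA, this]
  | succ n ih =>
    intro part h
    by_cases hlt : part < s.length
    · obtain ⟨a, hget⟩ : ∃ a, s[part]? = some a := ⟨s[part], List.getElem?_eq_getElem hlt⟩
      have hdrop : s.drop part = a :: s.drop (part + 1) :=
        List.drop_eq_getElem_cons hlt ▸ by
          simp [List.getElem?_eq_getElem hlt] at hget
          simp [hget]
      have hslice : PySem.List.slice s (some (part : Int)) (some ((part : Int) + ((1 : Nat) : Int))) = [a] := by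
        have h1 : ((part : Int) + ((1 : Nat) : Int)) = ((part + 1 : Nat) : Int) := by push_cast; ring
        rw [h1, PySem.List.slice_natCast, hdrop]
        simp
      simp only [pvChunksA, if_pos hlt, ih (part + 1) (by omega), hdrop, List.map_cons]
      rw [hslice]
    · have : s.drop part = [] := List.drop_eq_nil_of_le (by omega)
      simp [pvChunksA, hlt, this]

lemma pvMapGetDRange (l : List Int) :
    (List.range l.length).map (fun i => l.getD i 0) = l := by
  induction l with
  | nil => simp
  | cons x xs ih =>
    simp only [List.length_cons, List.range_succ_eq_map, List.map_cons, List.map_map]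
    simpa using ih

-- the first branch of A's sum construction is pvAddLE (u shorter or equal)
lemma pvBranch_eq (u : List Int) :
    ∀ v : List Int, u.length ≤ v.length →
      (List.range u.length).map (fun i => u.getD i 0 + v.getD i 0) ++
        (List.range' u.length (v.length - u.length)).map (fun i => v.getD i 0) = pvAddLE u v := by
  induction u with
  | nil =>
    intro v _
    simp only [pvAddLE, List.length_nil, List.range_zero, List.map_nil, List.nil_append,
      Nat.sub_zero]
    rw [← List.range_eq_range']
    exact pvMapGetDRange v
  | cons x xs ih =>
    intro v hle
    cases v with
    | nil => simp at hle
    | cons y ys =>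
      simp only [List.length_cons] at hle
      have hfun : (fun i => (1 : Nat) + i) = (fun i : Nat => i + 1) :=
        funext fun i => Nat.add_comm 1 i
      have hran : List.range' (xs.length + 1) (ys.length - xs.length) =
          (List.range' xs.length (ys.length - xs.length)).map (fun i : Nat => i + 1) := by
        rw [Nat.add_comm xs.length 1, ← List.map_add_range' (a := 1), hfun]
      simp only [List.length_cons,
        show ys.length + 1 - (xs.length + 1) = ys.length - xs.length from by omega,
        List.range_succ_eq_map, hran, List.map_cons, List.map_map, pvAddLE, List.cons_append]
      rw [← ih ys (by omega)]
      simp [Function.comp_def, Nat.succ_eq_add_one]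

lemma pvAddLE_comm : ∀ u v : List Int, pvAddLE u v = pvAddLE v u := by
  intro u
  induction u with
  | nil => intro v; cases v <;> simp [pvAddLE]
  | cons x xs ih =>
    intro v
    cases v with
    | nil => simp [pvAddLE]
    | cons y ys =>
      simp [pvAddLE, ih ys]
      try ring

lemma pvAddLE_length : ∀ u v : List Int, (pvAddLE u v).length = max u.length v.length := by
  intro u
  induction u with
  | nil => intro v; cases v <;> simp [pvAddLE]
  | cons x xs ih =>
    intro v
    cases v with
    | nil => simp [pvAddLE]
    | cons y ys =>
      simp [pvAddLE, ih ys]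
      try omega

lemma pvAddLE_bounds (b : Int) :
    ∀ u v : List Int, (∀ x ∈ u, 0 ≤ x ∧ x < b) → (∀ x ∈ v, 0 ≤ x ∧ x < b) →
      ∀ z ∈ pvAddLE u v, 0 ≤ z ∧ z ≤ 2 * b - 2 := by
  intro u
  induction u with
  | nil =>
    intro v _ hv z hz
    cases v with
    | nil => simp [pvAddLE] at hz
    | cons y ys =>
      have := hv z (by simpa [pvAddLE] using hz)
      omega
  | cons x xs ih =>
    intro v hu hv z hz
    cases v with
    | nil =>
      have := hu z (by simpa [pvAddLE] using hz)
      omega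
    | cons y ys =>
      simp only [pvAddLE, List.mem_cons] at hz
      rcases hz with rfl | hz
      · have h1 := hu x (by simp); have h2 := hv y (by simp); omega
      · exact ih ys (fun a ha => hu a (by simp [ha])) (fun a ha => hv a (by simp [ha])) z hz

lemma pvValLE_addLE (b : Int) :
    ∀ u v : List Int, pvValLE b (pvAddLE u v) = pvValLE b u + pvValLE b v := by
  intro u
  induction u with
  | nil => intro v; cases v <;> simp [pvAddLE, pvValLE]
  | cons x xs ih =>
    intro v
    cases v with
    | nil => simp [pvAddLE, pvValLE]
    | cons y ys => simp [pvAddLE, pvValLE, ih ys]; ring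

lemma pvValLE_append_singleton (b : Int) :
    ∀ (l : List Int) (z : Int), pvValLE b (l ++ [z]) = pvValLE b l + b ^ l.length * z := by
  intro l
  induction l with
  | nil => intro z; simp [pvValLE]
  | cons x xs ih => intro z; simp [pvValLE, ih]; ring

-- B's Horner fold computes the little-endian value of the reversed digit list
lemma pvHorner (b : Int) (f : Char → Int) :
    ∀ (s : List Char) (a : Int),
      s.foldl (fun v c => v * b + f c) a = a * b ^ s.length + pvValLE b ((s.map f).reverse) := by
  intro s
  induction s with
  | nil => intro a; simp [pvValLE]
  | cons x xs ih =>
    intro a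
    simp only [List.foldl_cons, ih, List.map_cons, List.reverse_cons,
      pvValLE_append_singleton, List.length_cons, List.length_reverse, List.length_map]
    ring

lemma pvCarryLoopA_ne_nil (b : Int) :
    ∀ s : List Int, s ≠ [] → pvCarryLoopA b s ≠ [] := by
  intro s
  fun_induction pvCarryLoopA b s <;> simp

lemma pvFinalA_cons (b a : Int) (t : List Int) (h : t ≠ []) :
    pvFinalA b (a :: t) = a :: pvFinalA b t := by
  cases t with
  | nil => exact absurd rfl h
  | cons u us =>
    simp only [pvFinalA, List.getLast?_cons_cons, List.dropLast_cons₂]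
    cases (u :: us).getLast? <;> simp
    split <;> simp

-- the heart: A's carry loop + final overflow check = divmod re-encoding of the value
lemma pvCarryFinal (b : Int) (hb : 1 ≤ b) :
    ∀ (r : List Int) (x : Int), 0 ≤ x → x ≤ 2 * b - 1 → (∀ y ∈ r, 0 ≤ y ∧ y ≤ 2 * b - 2) →
      pvFinalA b (pvCarryLoopA b (x :: r)) = pvEncFull b (r.length + 1) (x + b * pvValLE b r) := by
  intro r
  induction r with
  | nil =>
    intro x hx0 hx1 _
    simp only [pvCarryLoopA, pvValLE, List.length_nil, mul_zero, add_zero]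
    rw [pvEncFull_succ, pvEncFull_zero]
    by_cases hxb : x ≥ b
    · have hd := pvModFloor b (x - b) 1 (by omega) (by omega)
      have hxe : (x - b) + b * 1 = x := by ring
      rw [hxe] at hd
      simp only [pvFinalA, List.getLast?_singleton, if_pos hxb, hd.1, hd.2]
      simp
    · have hd := pvModFloor b x 0 hx0 (by omega)
      have hxe : x + b * 0 = x := by ring
      rw [hxe] at hd
      simp only [pvFinalA, List.getLast?_singleton, if_neg hxb, hd.1, hd.2]
      simp
  | cons y r' ih =>
    intro x hx0 hx1 hr
    have hy := hr y (by simp)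
    have hr' : ∀ z ∈ r', 0 ≤ z ∧ z ≤ 2 * b - 2 := fun z hz => hr z (by simp [hz])
    have hval : pvValLE b (y :: r') = y + b * pvValLE b r' := by simp [pvValLE]
    by_cases hxb : x ≥ b
    · have hd := pvModFloor b (x - b) ((y + 1) + b * pvValLE b r') (by omega) (by omega)
      have hxe : (x - b) + b * ((y + 1) + b * pvValLE b r') =
          x + b * (y + b * pvValLE b r') := by ring
      rw [hxe] at hd
      have hmx := pvModFloor b (x - b) 1 (by omega) (by omega)
      have hmxe : (x - b) + b * 1 = x := by ring
      rw [hmxe] at hmx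
      simp only [pvCarryLoopA, if_pos hxb]
      rw [pvFinalA_cons _ _ _ (pvCarryLoopA_ne_nil b _ (by simp)),
        ih (y + 1) (by omega) (by omega) hr',
        show (y :: r').length + 1 = (r'.length + 1) + 1 from by simp, hval]
      conv_rhs => rw [pvEncFull_succ]
      rw [hd.1, hd.2, hmx.1]
    · have hd := pvModFloor b x (y + b * pvValLE b r') hx0 (by omega)
      simp only [pvCarryLoopA, if_neg hxb]
      rw [pvFinalA_cons _ _ _ (pvCarryLoopA_ne_nil b _ (by simp)),
        ih y (by omega) (by omega) hr',
        show (y :: r').length + 1 = (r'.length + 1) + 1 from by simp, hval]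
      conv_rhs => rw [pvEncFull_succ]
      rw [hd.1, hd.2]

-- B's encode loop, named
lemma pvEncodeB_eq (bl : List Char) (b : Int) (hb : 0 < b) :
    ∀ (k : Nat) (t : Int),
      pvEncodeB bl b k t =
        ((pvEncLE b k t).map (fun d => PySem.List.pyGetD bl d ' '), pvQIter b k t) := by
  intro k
  induction k with
  | zero => intro t; simp [pvEncodeB, pvEncLE, pvQIter]
  | succ n ih =>
    intro t
    have hdm : PySem.Int.divmod? t b = some (PySem.Int.floordiv t b, PySem.Int.mod t b) := by
      simp [PySem.Int.divmod?, PySem.Int.floordiv, PySem.Int.mod, ne_of_gt hb]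
    simp [pvEncodeB, hdm, ih, pvEncLE, pvQIter]

lemma pvFindBounds (bl : List Char) (c : Char) (hc : c ∈ bl) :
    0 ≤ PySem.Chars.find bl [c] ∧ PySem.Chars.find bl [c] < (bl.length : Int) := by
  have h0 : 0 ≤ PySem.Chars.find bl [c] :=
    (PySem.Chars.find_nonneg_iff bl [c]).2 ((List.singleton_infix_iff c bl).2 hc)
  refine ⟨h0, ?_⟩
  have hle := PySem.Chars.find_le_length bl [c]
  rcases lt_or_eq_of_le hle with h | h
  · exact h
  · exfalso
    have hspec := (PySem.Chars.find_spec (s := bl) (sub := [c]) h0).1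
    rw [h] at hspec
    simp at hspec

lemma pvIfSum_eq (u v : List Int) :
    (if u.length < v.length then
        (List.range u.length).map (fun i => u.getD i 0 + v.getD i 0) ++
          (List.range' u.length (v.length - u.length)).map (fun i => v.getD i 0)
      else
        (List.range v.length).map (fun i => u.getD i 0 + v.getD i 0) ++
          (List.range' v.length (u.length - v.length)).map (fun i => u.getD i 0)) = pvAddLE u v := by
  split
  · exact pvBranch_eq u v (le_of_lt (by assumption))
  · have hvu : v.length ≤ u.length := le_of_not_gt (by assumption)
    have hflip : (fun i => u.getD i 0 + v.getD i 0) = fun i => v.getD i 0 + u.getD i 0 :=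
      funext fun i => add_comm _ _
    rw [hflip, pvBranch_eq v u hvu, pvAddLE_comm]

-- ===== VERDICT (by name: the statement is the Claim_ definition above) =====
theorem in_base_addition_spec : Claim_equal_in_base_addition := by
  intro number1 number2 base _dom hpre
  obtain ⟨hbase, hne, hc1b, hc2b⟩ := hpre
  have hc1 : ∀ c ∈ number1.toList, c ∈ base.toList := by simpa using hc1b
  have hc2 : ∀ c ∈ number2.toList, c ∈ base.toList := by simpa using hc2b
  have hb : (1 : Int) ≤ (base.toList.length : Int) := by
    have : 0 < base.toList.length := List.length_pos_iff.2 hbase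
    omega
  obtain ⟨c0, hget⟩ : ∃ c, PySem.Str.pyGet? base 0 = some c := by
    cases h : base.toList with
    | nil => exact absurd h hbase
    | cons c cs => exact ⟨c, by simp [pysem, h]⟩
  unfold Spec_in_base_addition
  simp only [in_base_addition, in_base_addition_alt, hget]
  rw [pvChunksA_eq number1.toList number1.toList.length 0 (by omega),
    pvChunksA_eq number2.toList number2.toList.length 0 (by omega),
    List.map_map, List.map_map]
  simp only [Function.comp_def, List.drop_zero]
  rw [pvIfSum_eq]
  -- bounds on the digit lists
  have hu : ∀ x ∈ (number1.toList.map (fun c => PySem.Chars.find base.toList [c])).reverse,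
      0 ≤ x ∧ x < (base.toList.length : Int) := by
    intro x hx
    rw [List.mem_reverse, List.mem_map] at hx
    obtain ⟨c, hc, rfl⟩ := hx
    exact pvFindBounds base.toList c (hc1 c hc)
  have hv : ∀ x ∈ (number2.toList.map (fun c => PySem.Chars.find base.toList [c])).reverse,
      0 ≤ x ∧ x < (base.toList.length : Int) := by
    intro x hx
    rw [List.mem_reverse, List.mem_map] at hx
    obtain ⟨c, hc, rfl⟩ := hx
    exact pvFindBounds base.toList c (hc2 c hc)
  have hbd := pvAddLE_bounds (base.toList.length : Int) _ _ hu hv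
  have hlen := pvAddLE_length
    ((number1.toList.map (fun c => PySem.Chars.find base.toList [c])).reverse)
    ((number2.toList.map (fun c => PySem.Chars.find base.toList [c])).reverse)
  cases hcase : pvAddLE
      ((number1.toList.map (fun c => PySem.Chars.find base.toList [c])).reverse)
      ((number2.toList.map (fun c => PySem.Chars.find base.toList [c])).reverse) with
  | nil =>
    exfalso
    rw [hcase] at hlen
    simp only [List.length_nil, List.length_reverse, List.length_map] at hlen
    have hpos : 0 < number1.toList.length ∨ 0 < number2.toList.length := by
      rcases hne with h | h
      · exact Or.inl (List.length_pos_iff.2 h)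
      · exact Or.inr (List.length_pos_iff.2 h)
    omega
  | cons h0 tl =>
    rw [hcase] at hbd hlen
    have h00 := hbd h0 (List.mem_cons_self)
    have htl : ∀ z ∈ tl, 0 ≤ z ∧ z ≤ 2 * (base.toList.length : Int) - 2 :=
      fun z hz => hbd z (List.mem_cons_of_mem _ hz)
    rw [pvCarryFinal (base.toList.length : Int) hb tl h0 h00.1 (by omega) htl]
    -- the width of B's encode loop is the length of A's sum list
    have hw : max number1.toList.length number2.toList.length = tl.length + 1 := by
      simp only [List.length_reverse, List.length_map, List.length_cons] at hlen
      omega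
    -- B's total is the value of A's sum list
    have ht1 : pvToIntB base.toList number1.toList =
        pvValLE (base.toList.length : Int)
          ((number1.toList.map (fun c => PySem.Chars.find base.toList [c])).reverse) := by
      simp only [pvToIntB]
      rw [pvHorner ((base.toList.length : Nat) : Int) (fun c => PySem.Chars.find base.toList [c])]
      simp
    have ht2 : pvToIntB base.toList number2.toList =
        pvValLE (base.toList.length : Int)
          ((number2.toList.map (fun c => PySem.Chars.find base.toList [c])).reverse) := by
      simp only [pvToIntB]
      rw [pvHorner ((base.toList.length : Nat) : Int) (fun c => PySem.Chars.find base.toList [c])]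
      simp
    have htot : pvToIntB base.toList number1.toList + pvToIntB base.toList number2.toList =
        h0 + (base.toList.length : Int) * pvValLE (base.toList.length : Int) tl := by
      rw [ht1, ht2, ← pvValLE_addLE, hcase]
      simp [pvValLE]
    rw [hw, htot, pvEncodeB_eq base.toList (base.toList.length : Int) (by omega)]
    -- both sides now map the digit-to-char extraction over the same digit list
    rw [PySem.List.foldl_append_singleton_eq_map]
    simp only [pvEncFull]
    split <;> simp [List.map_reverse]

theorem in_base_addition_raises : Claim_raises_in_base_addition := by
  unfold Claim_raises_in_base_addition
  refine ⟨?_, by decide⟩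
  intro n1 n2 b _ hr hp
  rcases hp with ⟨_, h, _⟩
  rcases h with h | h <;> exact h (by rcases hr with ⟨h1, h2⟩; first | exact h1 | exact h2)

-- self-check: the recorded raise-witness value is the one the raises theorem proves
theorem in_base_addition_raises_witness_ok :
    in_base_addition_alt pvRaiseWitness_in_base_addition.1 pvRaiseWitness_in_base_addition.2.1
      pvRaiseWitness_in_base_addition.2.2 = pvRaiseWitnessOut_in_base_addition :=
  in_base_addition_raises.2.2.2
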